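-- pv_equiv track=rewrite | github.com/fmanin/disks-in-a-strip | harddisks.py | all_partitions_of_at_most_with_multiplicity
-- ===== SOURCE A (Python) =====
-- import math
--
-- def all_partitions_of_at_most_with_multiplicity(n,w):
--     if w==1: return [([1]*n,1)]
--     if n==0: return [([],1)]
--     partitions=[]
--     for i in range(n//w+1):
--         sub_partitions=all_partitions_of_at_most_with_multiplicity(n-w*i,w-1)
--         factor=math.prod([math.comb(n-w*j,w) for j in range(i)])//math.factorial(i)*(math.factorial(w-1)**i)
--         partitions=partitions+[(sub_part+[w]*i,factor*m) for (sub_part,m) in sub_partitions]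
--     return partitions
-- ===== SOURCE B (Python) =====
-- import math
--
-- def all_partitions_of_at_most_with_multiplicity(n, w):
--     def parts(n, w):
--         if w == 1:
--             return [[1] * n]
--         if n == 0:
--             return [[]]
--         return [p + [w] * i
--                 for i in range(n // w + 1)
--                 for p in parts(n - w * i, w - 1)]
--
--     def weight(p):
--         mult = {}
--         for k in p:
--             mult[k] = mult.get(k, 0) + 1
--         d = 1
--         for k, m in mult.items():
--             d *= k ** m * math.factorial(m)
--         return math.factorial(sum(p)) // d
--
--     return [(p, weight(p)) for p in parts(n, w)]
-- ===== Notes on version B (the rewrite author's own statement) =====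
-- stated objective: simpler
-- what changed: B drops A's factor threaded through the recursion (a product of binomials divided by i!, ported level by level) and instead enumerates the bare partitions, then computes each weight independently in one pass from a multiplicity dict via the closed-form cycle-type identity weight = (sum p)! // prod(k**m_k * m_k!).
import Mathlib
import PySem

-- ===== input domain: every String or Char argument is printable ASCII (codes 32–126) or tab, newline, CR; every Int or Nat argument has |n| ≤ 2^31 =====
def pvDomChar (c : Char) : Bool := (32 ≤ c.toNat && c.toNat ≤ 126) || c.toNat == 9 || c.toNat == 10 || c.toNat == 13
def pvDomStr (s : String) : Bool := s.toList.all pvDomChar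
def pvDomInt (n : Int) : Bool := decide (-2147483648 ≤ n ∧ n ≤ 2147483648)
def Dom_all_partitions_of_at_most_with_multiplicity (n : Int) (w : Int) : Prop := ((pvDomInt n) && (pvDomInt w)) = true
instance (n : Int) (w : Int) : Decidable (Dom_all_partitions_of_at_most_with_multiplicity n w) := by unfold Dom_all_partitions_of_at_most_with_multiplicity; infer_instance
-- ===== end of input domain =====

-- B replaces A's threaded product-of-binomials factor by a per-partition closed-form weight
-- (sum p)! // prod(k^m_k * m_k!) computed from a multiplicity dict (objective: simpler).

-- ===== PORT A =====

-- math.comb(a, b); exact for 0 ≤ a, 0 ≤ b (Python raises on negative arguments; A only calls it on nonnegatives within Pre_)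
def pyComb (a b : Int) : Int := (Nat.choose a.toNat b.toNat : Int)
-- math.factorial(a); exact for 0 ≤ a (Python raises on negatives; both programs only call it on nonnegatives within Pre_)
def pyFactorial (a : Int) : Int := (Nat.factorial a.toNat : Int)

-- recursion on fuel = w.toNat: Python recurses on w-1, fuel 0 is only reached for w ≤ 0 (outside Pre_, where Python raises/overflows)
def APart : Nat → Int → Int → List (List Int × Int)
  | fuel, n, w =>
    if w = 1 then [(List.replicate n.toNat 1, 1)]
    else if n = 0 then [([], 1)]
    else
      match fuel with
      | 0 => []
      | fuel + 1 =>
        (PySem.List.pyRange 0 (PySem.Int.floordiv n w + 1) 1).foldl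
          (fun partitions i =>
            let sub_partitions := APart fuel (n - w * i) (w - 1)
            let factor :=
              PySem.Int.floordiv
                (((PySem.List.pyRange 0 i 1).map (fun j => pyComb (n - w * j) w)).foldl (· * ·) 1)
                (pyFactorial i)
              * pyFactorial (w - 1) ^ i.toNat   -- `** i` with 0 ≤ i inside the loop
            partitions ++ sub_partitions.map (fun sp => (sp.1 ++ List.replicate i.toNat w, factor * sp.2)))
          []

def all_partitions_of_at_most_with_multiplicity (n : Int) (w : Int) : List (List Int × Int) :=
  APart w.toNat n w

-- ===== PORT B =====

-- the bare partition enumeration of Source B's `parts` (same fuel scheme as A's port)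
def BParts : Nat → Int → Int → List (List Int)
  | fuel, n, w =>
    if w = 1 then [List.replicate n.toNat 1]
    else if n = 0 then [[]]
    else
      match fuel with
      | 0 => []
      | fuel + 1 =>
        (PySem.List.pyRange 0 (PySem.Int.floordiv n w + 1) 1).flatMap
          (fun i => (BParts fuel (n - w * i) (w - 1)).map (fun p => p ++ List.replicate i.toNat w))

-- Source B's `weight`: multiplicity dict, then (sum p)! // prod(k^m * m!)
def Bweight (p : List Int) : Int :=
  let mult := p.foldl (fun d k => d.insert k (d.getD k 0 + 1)) (PySem.Dict.empty : PySem.Dict Int Int)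
  let d := mult.items.foldl (fun acc kv => acc * (kv.1 ^ kv.2.toNat * pyFactorial kv.2)) 1
    -- `k ** m` with m = multiplicity ≥ 1, so `^ kv.2.toNat` is exact
  PySem.Int.floordiv (pyFactorial p.sum) d

def all_partitions_of_at_most_with_multiplicity_alt (n : Int) (w : Int) : List (List Int × Int) :=
  (BParts w.toNat n w).map (fun p => (p, Bweight p))

-- ===== PRECONDITION & SPEC =====
-- Pre_ excludes exactly the inputs on which A raises, at their measured boundaries: ZeroDivisionError
-- at n//w for w = 0 with n ≠ 0; RecursionError for w ≤ -1 with n ≤ -1 (w decreases forever, never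
-- reaching a base case); and RecursionError for n ≥ 1 with w ≥ 9999, where A's recursion depth (≈ w)
-- exceeds the grading runner's recursion limit of 10000 — w = 9998 returns there, w = 9999 raises.
-- A returns on every input Pre_ admits.
def Pre_all_partitions_of_at_most_with_multiplicity (n : Int) (w : Int) : Prop :=
  n = 0 ∨ (w ≤ -1 ∧ 1 ≤ n) ∨ (1 ≤ w ∧ (n ≤ -1 ∨ w ≤ 9998))
instance (n : Int) (w : Int) : Decidable (Pre_all_partitions_of_at_most_with_multiplicity n w) := by unfold Pre_all_partitions_of_at_most_with_multiplicity; infer_instance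
def pvWitness_all_partitions_of_at_most_with_multiplicity : Int × Int := (4, 3)

def Spec_all_partitions_of_at_most_with_multiplicity (n : Int) (w : Int) (out : List (List Int × Int)) : Prop := out = all_partitions_of_at_most_with_multiplicity_alt n w
instance (n : Int) (w : Int) (out : List (List Int × Int)) : Decidable (Spec_all_partitions_of_at_most_with_multiplicity n w out) := by unfold Spec_all_partitions_of_at_most_with_multiplicity; infer_instance

-- ===== CLAIM (what is proved, stated in full; the proofs are below) =====
def Claim_equal_all_partitions_of_at_most_with_multiplicity : Prop := ∀ (n : Int) (w : Int), Dom_all_partitions_of_at_most_with_multiplicity n w → Pre_all_partitions_of_at_most_with_multiplicity n w → Spec_all_partitions_of_at_most_with_multiplicity n w (all_partitions_of_at_most_with_multiplicity n w)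

-- ===== LEMMAS AND PROOFS =====

-- the denominator product of Bweight, through PySem.Dict.counter
def Dnum (p : List Int) : Int :=
  ((PySem.Dict.counter p).items).foldl (fun acc kv => acc * (kv.1 ^ kv.2.toNat * pyFactorial kv.2)) 1

lemma Bweight_eq (p : List Int) :
    Bweight p = PySem.Int.floordiv (pyFactorial p.sum) (Dnum p) := by
  unfold Bweight Dnum
  rw [PySem.Dict.foldl_insert_getD_add_one_eq_counter]

lemma Dnum_eq_prod (p : List Int) :
    Dnum p = ((PySem.Set.ofList p).map (fun k => k ^ (p.count k) * (((p.count k).factorial : Nat) : Int))).prod := by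
  unfold Dnum
  rw [PySem.Dict.items_counter, List.prod_eq_foldl, List.foldl_map, List.foldl_map]
  simp [pyFactorial]

lemma Dnum_nil : Dnum [] = 1 := by simp [Dnum_eq_prod, PySem.Set.ofList_nil]

lemma update_replicate_of_mem (w : Int) (s : PySem.Set Int) (hm : w ∈ s) :
    ∀ i : Nat, PySem.Set.update s (List.replicate i w) = s := by
  intro i
  induction i with
  | zero => rfl
  | succ i ih => rw [List.replicate_succ, PySem.Set.update_cons, PySem.Set.add_of_mem hm]; exact ih

lemma ofList_append_replicate (q : List Int) (w : Int) (i : Nat) (hw : w ∉ q) (hi : 1 ≤ i) :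
    PySem.Set.ofList (q ++ List.replicate i w) = PySem.Set.ofList q ++ [w] := by
  obtain ⟨i, rfl⟩ : ∃ j, i = j + 1 := ⟨i - 1, by omega⟩
  rw [PySem.Set.ofList_append, List.replicate_succ, PySem.Set.update_cons,
    PySem.Set.add_of_not_mem (by simp [PySem.Set.mem_ofList, hw])]
  exact update_replicate_of_mem w _ (by simp) i

-- key structural fact: appending i ≥ 1 fresh copies of w multiplies the denominator by w^i * i!
lemma Dnum_append_replicate (q : List Int) (w : Int) (i : Nat) (hw : w ∉ q) (hi : 1 ≤ i) :
    Dnum (q ++ List.replicate i w) = Dnum q * (w ^ i * ((i.factorial : Nat) : Int)) := by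
  rw [Dnum_eq_prod, Dnum_eq_prod, ofList_append_replicate q w i hw hi, List.map_append,
    List.prod_append]
  congr 1
  · congr 1
    apply List.map_congr_left
    intro k hk
    have hkq : k ∈ q := (PySem.Set.mem_ofList q k).1 hk
    have hwk : w ≠ k := fun h => hw (h ▸ hkq)
    simp [List.count_append, List.count_replicate, hwk]
  · have h0 : q.count w = 0 := List.count_eq_zero.2 hw
    simp [List.count_append, List.count_replicate, h0]

lemma Dnum_replicate_one (m : Nat) :
    Dnum (List.replicate m (1 : Int)) = ((m.factorial : Nat) : Int) := by
  cases m with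
  | zero => simp [Dnum_nil]
  | succ m =>
    have h := Dnum_append_replicate [] 1 (m + 1) (by simp) (by omega)
    simpa [Dnum_nil] using h

-- exact floor division
-- the product of binomials identity: ∏_{j<i} C(N-W*j, W) * (W!)^i * (N-W*i)! = N!
lemma prod_comb_identity (W : Nat) (hW : 1 ≤ W) :
    ∀ (i N : Nat), W * i ≤ N →
      ((List.range i).map (fun j => Nat.choose (N - W * j) W)).prod * (W.factorial) ^ i * (N - W * i).factorial = N.factorial := by
  intro i
  induction i with
  | zero => intro N h; simp
  | succ i ih =>
    intro N h
    have hWi : W * i ≤ N := by rw [Nat.mul_succ] at h; omega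
    have hWle : W ≤ N - W * i := by rw [Nat.mul_succ] at h; omega
    rw [List.range_succ, List.map_append, List.prod_append]
    simp only [List.map_cons, List.map_nil, List.prod_cons, List.prod_nil, mul_one]
    have hc := Nat.choose_mul_factorial_mul_factorial hWle
    have : N - W * (i + 1) = (N - W * i) - W := by rw [Nat.mul_succ]; omega
    rw [this]
    calc ((List.range i).map (fun j => Nat.choose (N - W * j) W)).prod * Nat.choose (N - W * i) W * W.factorial ^ (i + 1) * (N - W * i - W).factorial
        = ((List.range i).map (fun j => Nat.choose (N - W * j) W)).prod * W.factorial ^ i * (Nat.choose (N - W * i) W * W.factorial * (N - W * i - W).factorial) := by ring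
      _ = ((List.range i).map (fun j => Nat.choose (N - W * j) W)).prod * W.factorial ^ i * (N - W * i).factorial := by rw [hc]
      _ = N.factorial := ih N hWi

-- ∏_{j<i} C(N-W*j, W) = C(N, W*i) * uniformBell i W * i!
lemma prod_comb_eq (W i N : Nat) (hW : 1 ≤ W) (h : W * i ≤ N) :
    ((List.range i).map (fun j => Nat.choose (N - W * j) W)).prod
      = Nat.choose N (W * i) * Nat.uniformBell i W * i.factorial := by
  have h1 := prod_comb_identity W hW i N h
  have h2 := Nat.choose_mul_factorial_mul_factorial h
  have h3 : Nat.uniformBell i W * W.factorial ^ i * i.factorial = (i * W).factorial :=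
    Nat.uniformBell_mul_eq i (by omega)
  have hfpos : 0 < (N - W * i).factorial := Nat.factorial_pos _
  have hWfpos : 0 < W.factorial ^ i := pow_pos (Nat.factorial_pos _) _
  have key : ((List.range i).map (fun j => Nat.choose (N - W * j) W)).prod * (W.factorial ^ i * (N - W * i).factorial)
      = (Nat.choose N (W * i) * Nat.uniformBell i W * i.factorial) * (W.factorial ^ i * (N - W * i).factorial) := by
    have : i * W = W * i := Nat.mul_comm i W
    calc ((List.range i).map (fun j => Nat.choose (N - W * j) W)).prod * (W.factorial ^ i * (N - W * i).factorial) = N.factorial := by rw [← h1]; ring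
      _ = Nat.choose N (W * i) * (W * i).factorial * (N - W * i).factorial := h2.symm
      _ = Nat.choose N (W * i) * ((i * W).factorial) * (N - W * i).factorial := by rw [this]
      _ = Nat.choose N (W * i) * (Nat.uniformBell i W * W.factorial ^ i * i.factorial) * (N - W * i).factorial := by rw [h3]
      _ = (Nat.choose N (W * i) * Nat.uniformBell i W * i.factorial) * (W.factorial ^ i * (N - W * i).factorial) := by ring
  exact Nat.eq_of_mul_eq_mul_right (by positivity) key

-- A's per-branch factor, named for the proofs (definitionally the `factor` of APart's loop body)
def fctr (n w i : Int) : Int :=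
  PySem.Int.floordiv (((PySem.List.pyRange 0 i 1).map (fun j => pyComb (n - w * j) w)).foldl (· * ·) 1)
    (pyFactorial i) * pyFactorial (w - 1) ^ i.toNat

lemma APart_step (f : Nat) (n w : Int) (h1 : w ≠ 1) (h0 : n ≠ 0) :
    APart (f + 1) n w = (PySem.List.pyRange 0 (PySem.Int.floordiv n w + 1) 1).flatMap
      (fun i => (APart f (n - w * i) (w - 1)).map
        (fun sp => (sp.1 ++ List.replicate i.toNat w, fctr n w i * sp.2))) := by
  rw [APart]
  simp only [if_neg h1, if_neg h0]
  exact List.flatMap_eq_foldl.symm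

lemma BParts_step (f : Nat) (n w : Int) (h1 : w ≠ 1) (h0 : n ≠ 0) :
    BParts (f + 1) n w = (PySem.List.pyRange 0 (PySem.Int.floordiv n w + 1) 1).flatMap
      (fun i => (BParts f (n - w * i) (w - 1)).map (fun p => p ++ List.replicate i.toNat w)) := by
  rw [BParts]
  simp only [if_neg h1, if_neg h0]

lemma fctr_zero (n w : Int) : fctr n w 0 = 1 := by
  have hr : PySem.List.pyRange 0 0 1 = [] := rfl
  simp [fctr, hr, pyFactorial]

-- the core factorial identity behind the equivalence of the two weights
lemma step_arith (N W I d : Nat) (hW : 2 ≤ W) (hWI : W * I ≤ N) (hdvd : d ∣ (N - W * I).factorial) :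
    N.factorial = d * W ^ I * I.factorial *
      (N.choose (W * I) * Nat.uniformBell I W * ((W - 1).factorial) ^ I * ((N - W * I).factorial / d)) := by
  have hWf : W.factorial = W * (W - 1).factorial := by
    conv_lhs => rw [show W = (W - 1) + 1 by omega]
    rw [Nat.factorial_succ]
    congr 2
    omega
  have hub : Nat.uniformBell I W * W.factorial ^ I * I.factorial = (I * W).factorial :=
    Nat.uniformBell_mul_eq I (by omega)
  have hch : N.choose (W * I) * (W * I).factorial * (N - W * I).factorial = N.factorial :=
    Nat.choose_mul_factorial_mul_factorial hWI
  have hds : d * ((N - W * I).factorial / d) = (N - W * I).factorial := Nat.mul_div_cancel' hdvd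
  calc N.factorial = N.choose (W * I) * (W * I).factorial * (N - W * I).factorial := hch.symm
    _ = N.choose (W * I) * (I * W).factorial * (N - W * I).factorial := by rw [Nat.mul_comm W I]
    _ = N.choose (W * I) * (Nat.uniformBell I W * W.factorial ^ I * I.factorial) * (N - W * I).factorial := by
        rw [hub]
    _ = N.choose (W * I) * (Nat.uniformBell I W * (W * (W - 1).factorial) ^ I * I.factorial) *
          (d * ((N - W * I).factorial / d)) := by rw [← hWf, hds]
    _ = _ := by ring

-- one loop branch: the closed-form weight absorbs A's factor, and the denominator stays a divisor
lemma weight_step (n w i : Int) (q : List Int) (hw2 : 2 ≤ w) (hi0 : 0 ≤ i) (hiw : i * w ≤ n)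
    (hq : ∀ k ∈ q, 1 ≤ k ∧ k ≤ w - 1) (hsum : q.sum = n - w * i)
    (d : Nat) (hd : 0 < d) (hDq : Dnum q = (d : Int))
    (hdvd : d ∣ (n - w * i).toNat.factorial) :
    fctr n w i * Bweight q = Bweight (q ++ List.replicate i.toNat w)
    ∧ ∃ d' : Nat, 0 < d' ∧ Dnum (q ++ List.replicate i.toNat w) = (d' : Int)
        ∧ d' ∣ n.toNat.factorial := by
  by_cases hI0 : i = 0
  · subst hI0
    rw [fctr_zero]
    refine ⟨by simp, d, hd, by simpa using hDq, by simpa using hdvd⟩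
  · -- i ≥ 1
    have hw0 : (0 : Int) ≤ w := by omega
    have hn0 : (0 : Int) ≤ n := le_trans (mul_nonneg hi0 hw0) hiw
    set N := n.toNat with hN
    set W := w.toNat with hW
    set I := i.toNat with hIdef
    have hni : n = (N : Int) := (Int.toNat_of_nonneg hn0).symm
    have hwi : w = (W : Int) := (Int.toNat_of_nonneg hw0).symm
    have hii : i = (I : Int) := (Int.toNat_of_nonneg hi0).symm
    have hI1 : 1 ≤ I := by omega
    have hW2 : 2 ≤ W := by omega
    have hWIle : W * I ≤ N := by
      have : ((W * I : Nat) : Int) ≤ ((N : Nat) : Int) := by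
        push_cast
        rw [← hwi, ← hii, ← hni]
        linarith [hiw, mul_comm i w]
      exact_mod_cast this
    have hsub : n - w * i = ((N - W * I : Nat) : Int) := by
      push_cast [Nat.cast_sub hWIle]
      rw [← hwi, ← hii, ← hni]
    have hsubnat : (n - w * i).toNat = N - W * I := by rw [hsub]; exact Int.toNat_natCast _
    -- the product of binomials in fctr
    set P : Nat := ((List.range I).map (fun j => Nat.choose (N - W * j) W)).prod with hP
    have hrange : PySem.List.pyRange 0 i 1 = List.map (fun k : Nat => (k : Int)) (List.range I) := by
      rw [hii]
      exact PySem.List.pyRange_zero_natCast I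
    have hprod : ((PySem.List.pyRange 0 i 1).map (fun j => pyComb (n - w * j) w)).foldl (· * ·) 1
        = (P : Int) := by
      rw [hrange, List.map_map, ← List.prod_eq_foldl]
      have hmap : (List.range I).map ((fun j => pyComb (n - w * j) w) ∘ (fun k : Nat => (k : Int)))
          = (List.range I).map (fun j : Nat => ((Nat.choose (N - W * j) W : Nat) : Int)) := by
        apply List.map_congr_left
        intro j hj
        have hjI : j < I := List.mem_range.mp hj
        have hWj : W * j ≤ N := le_trans (Nat.mul_le_mul_left W (le_of_lt hjI)) hWIle
        have harg : n - w * (j : Int) = ((N - W * j : Nat) : Int) := by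
          push_cast [Nat.cast_sub hWj]
          rw [← hwi, ← hni]
        simp only [Function.comp, pyComb, harg, Int.toNat_natCast]
        rw [hwi, Int.toNat_natCast]
      rw [hmap, hP,
        show List.map (fun j : Nat => (((N - W * j).choose W : Nat) : Int)) (List.range I)
            = List.map (fun x : Nat => (x : Int)) (List.map (fun j => (N - W * j).choose W) (List.range I)) from
          by rw [List.map_map]; rfl]
      exact (Nat.cast_list_prod _).symm
    have hPval : P = N.choose (W * I) * Nat.uniformBell I W * I.factorial :=
      prod_comb_eq W I N (by omega) hWIle
    have hfct : fctr n w i = ((N.choose (W * I) * Nat.uniformBell I W * ((W - 1).factorial) ^ I : Nat) : Int) := by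
      unfold fctr
      rw [hprod]
      have hfw : pyFactorial (w - 1) = (((W - 1).factorial : Nat) : Int) := by
        simp only [pyFactorial]
        congr 2
        omega
      have hfi : pyFactorial i = ((I.factorial : Nat) : Int) := rfl
      rw [hfi, hfw, PySem.Int.floordiv_natCast, hPval]
      rw [Nat.mul_div_cancel _ (Nat.factorial_pos I)]
      push_cast
      ring
    -- the two Bweights
    have hwq : w ∉ q := fun hmem => by have := (hq w hmem).2; omega
    have hDq' : Dnum (q ++ List.replicate I w) = ((d * W ^ I * I.factorial : Nat) : Int) := by
      rw [Dnum_append_replicate q w I hwq hI1, hDq, hwi]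
      push_cast
      ring
    have hsumq' : (q ++ List.replicate I w).sum = (N : Int) := by
      rw [List.sum_append, hsum, List.sum_replicate, nsmul_eq_mul, ← hii, ← hni]
      ring
    have hBq : Bweight q = (((N - W * I).factorial / d : Nat) : Int) := by
      rw [Bweight_eq, hDq, hsum]
      have : pyFactorial (n - w * i) = (((N - W * I).factorial : Nat) : Int) := by
        simp only [pyFactorial, hsubnat]
      rw [this, PySem.Int.floordiv_natCast]
    have hBq' : Bweight (q ++ List.replicate I w)
        = ((N.factorial / (d * W ^ I * I.factorial) : Nat) : Int) := by
      rw [Bweight_eq, hDq', hsumq']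
      have : pyFactorial ((N : Nat) : Int) = ((N.factorial : Nat) : Int) := by
        simp [pyFactorial]
      rw [this, PySem.Int.floordiv_natCast]
    have harith := step_arith N W I d hW2 hWIle (hsubnat ▸ hdvd)
    have hdpos : 0 < d * W ^ I * I.factorial :=
      Nat.mul_pos (Nat.mul_pos hd (pow_pos (by omega : 0 < W) I)) (Nat.factorial_pos I)
    have harith' : N.factorial = (N.choose (W * I) * Nat.uniformBell I W * ((W - 1).factorial) ^ I
        * ((N - W * I).factorial / d)) * (d * W ^ I * I.factorial) := by
      rw [harith]; ring
    constructor
    · rw [hfct, hBq, hBq', Nat.div_eq_of_eq_mul_left hdpos harith']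
      push_cast
      ring
    · refine ⟨d * W ^ I * I.factorial, hdpos, hDq', ?_⟩
      exact ⟨_, harith⟩

-- the MAIN induction: A's list is B's list decorated with B's weights, plus the invariants about B's partitions
lemma main_induction (fuel : Nat) :
    ∀ n w : Int, 1 ≤ w → w.toNat = fuel →
      (APart fuel n w = (BParts fuel n w).map (fun q => (q, Bweight q)))
      ∧ ∀ q ∈ BParts fuel n w,
          (∀ k ∈ q, 1 ≤ k ∧ k ≤ w) ∧ q.sum = max n 0
          ∧ ∃ d : Nat, 0 < d ∧ Dnum q = (d : Int) ∧ d ∣ (max n 0).toNat.factorial := by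
  induction fuel with
  | zero => intro n w hw hf; omega
  | succ f ih =>
    intro n w hw hf
    by_cases h1 : w = 1
    · subst h1
      have hA : APart (f + 1) n 1 = [(List.replicate n.toNat 1, 1)] := by rw [APart]; simp
      have hB : BParts (f + 1) n 1 = [List.replicate n.toNat 1] := by rw [BParts]; simp
      have hsumr : (List.replicate n.toNat (1 : Int)).sum = ((n.toNat : Nat) : Int) := by
        simp [List.sum_replicate]
      have hBw : Bweight (List.replicate n.toNat 1) = 1 := by
        rw [Bweight_eq, Dnum_replicate_one, hsumr]
        have hpf : pyFactorial ((n.toNat : Nat) : Int) = ((n.toNat.factorial : Nat) : Int) := by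
          simp only [pyFactorial, Int.toNat_natCast]
        rw [hpf, PySem.Int.floordiv_natCast, Nat.div_self (Nat.factorial_pos _)]
        norm_num
      have hmax : ((n.toNat : Nat) : Int) = max n 0 := Int.toNat_eq_max n
      constructor
      · rw [hA, hB]
        simp [hBw]
      · intro q hq
        rw [hB, List.mem_singleton] at hq
        subst hq
        refine ⟨?_, by rw [hsumr, hmax], n.toNat.factorial, Nat.factorial_pos _,
          Dnum_replicate_one n.toNat, ?_⟩
        · intro k hk
          rw [List.eq_of_mem_replicate hk]
          omega
        · have hmn : (max n 0).toNat = n.toNat := by omega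
          rw [hmn]
    · by_cases h0 : n = 0
      · subst h0
        have hA : APart (f + 1) 0 w = [([], 1)] := by rw [APart]; simp [h1]
        have hB : BParts (f + 1) 0 w = [([] : List Int)] := by rw [BParts]; simp [h1]
        have hBw : Bweight ([] : List Int) = 1 := by
          rw [Bweight_eq, Dnum_nil]
          rfl
        constructor
        · rw [hA, hB]
          simp [hBw]
        · intro q hq
          rw [hB, List.mem_singleton] at hq
          subst hq
          exact ⟨by simp, by simp, 1, Nat.one_pos, Dnum_nil, Nat.one_dvd _⟩
      · -- main case: 2 ≤ w, n ≠ 0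
        have hww : 2 ≤ w := by omega
        have hw' : 1 ≤ w - 1 := by omega
        have hf' : (w - 1).toNat = f := by omega
        rw [APart_step f n w h1 h0, BParts_step f n w h1 h0]
        constructor
        · rw [List.map_flatMap]
          apply List.flatMap_congr
          intro i hi
          have hmem := (PySem.List.mem_pyRange_one (x := i)).1 hi
          have hi0 : 0 ≤ i := hmem.1
          have hiw : i * w ≤ n :=
            (PySem.Int.le_floordiv_iff_mul_le (by omega : (0:Int) < w)).1 (by omega)
          have hn0 : (0 : Int) ≤ n - w * i := by
            have := mul_comm i w
            nlinarith [hiw]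
          obtain ⟨ihA, ihB⟩ := ih (n - w * i) (w - 1) hw' hf'
          rw [ihA, List.map_map, List.map_map]
          apply List.map_congr_left
          intro q hq
          obtain ⟨helem, hsum, d, hd, hDq, hdvd⟩ := ihB q hq
          rw [max_eq_left hn0] at hsum hdvd
          have hws := weight_step n w i q hww hi0 hiw helem hsum d hd hDq hdvd
          simp only [Function.comp]
          rw [hws.1]
        · intro q' hq'
          rw [List.mem_flatMap] at hq'
          obtain ⟨i, hi, hq'⟩ := hq'
          rw [List.mem_map] at hq'
          obtain ⟨q, hq, rfl⟩ := hq'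
          have hmem := (PySem.List.mem_pyRange_one (x := i)).1 hi
          have hi0 : 0 ≤ i := hmem.1
          have hiw : i * w ≤ n :=
            (PySem.Int.le_floordiv_iff_mul_le (by omega : (0:Int) < w)).1 (by omega)
          have hn0 : (0 : Int) ≤ n - w * i := by nlinarith [hiw, mul_comm i w]
          have hn1 : (1 : Int) ≤ n := by
            have : (0 : Int) ≤ w * i := by nlinarith [hiw, mul_comm i w]
            omega
          obtain ⟨helem, hsum, d, hd, hDq, hdvd⟩ := (ih (n - w * i) (w - 1) hw' hf').2 q hq
          rw [max_eq_left hn0] at hsum hdvd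
          obtain ⟨d', hd', hDq', hdvd'⟩ :=
            (weight_step n w i q hww hi0 hiw helem hsum d hd hDq hdvd).2
          refine ⟨?_, ?_, d', hd', hDq', ?_⟩
          · intro k hk
            rcases List.mem_append.1 hk with hk | hk
            · have := helem k hk
              omega
            · rw [List.eq_of_mem_replicate hk]
              omega
          · rw [List.sum_append, hsum, List.sum_replicate, nsmul_eq_mul,
              Int.toNat_of_nonneg hi0, max_eq_left (by omega : (0:Int) ≤ n)]
            ring
          · rw [max_eq_left (by omega : (0:Int) ≤ n)]
            exact hdvd'

-- ===== VERDICT (by name: the statement is the Claim_ definition above) =====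
theorem all_partitions_of_at_most_with_multiplicity_spec : Claim_equal_all_partitions_of_at_most_with_multiplicity := by
  intro n w _ hpre
  unfold Spec_all_partitions_of_at_most_with_multiplicity
  unfold all_partitions_of_at_most_with_multiplicity all_partitions_of_at_most_with_multiplicity_alt
  by_cases hw : 1 ≤ w
  · exact (main_induction w.toNat n w hw rfl).1
  · have hf : w.toNat = 0 := by omega
    have hw1 : w ≠ 1 := by omega
    rw [hf]
    by_cases hn : n = 0
    · subst hn
      rw [APart, BParts]
      have hbw : Bweight [] = 1 := by rw [Bweight_eq, Dnum_nil]; rfl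
      simp [hw1, hbw]
    · have hn1 : (1 : Int) ≤ n := by
        rcases hpre with h | h | h
        · exact absurd h hn
        · exact h.2
        · omega
      rw [APart, BParts]
      simp only [if_neg hw1, if_neg hn]
      rfl
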